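-- pv_equiv track=rewrite | github.com/lmarte17/athena | backend/adk-bidi/app/orchestrator/conversation_orchestrator.py | _is_confirmation_rejection
-- ===== SOURCE A (Python) =====
-- def _is_confirmation_rejection(text: str) -> bool:
--     if not text:
--         return False
--     rejected_phrases = (
--         "no",
--         "no thanks",
--         "no thank you",
--         "don't",
--         "do not",
--         "cancel that",
--         "never mind",
--         "not now",
--         "stop",
--     )
--     return any(text == phrase or text.startswith(f"{phrase} ") for phrase in rejected_phrases)
-- ===== SOURCE B (Python) =====
-- def _is_confirmation_rejection(text: str) -> bool:
--     phrases = {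
--         "no",
--         "no thanks",
--         "no thank you",
--         "don't",
--         "do not",
--         "cancel that",
--         "never mind",
--         "not now",
--         "stop",
--     }
--     prefix = ""
--     for ch in text:
--         if ch == ' ' and prefix in phrases:
--             return True
--         prefix += ch
--     return prefix in phrases
-- ===== Notes on version B (the rewrite author's own statement) =====
-- stated objective: alternative
-- what changed: B is a single left-to-right scan of the text with a growing prefix accumulator, testing the prefix against a set of phrases at each space and at the end, instead of A's loop over the phrase tuple with equals/startswith per phrase.
import Mathlib
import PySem

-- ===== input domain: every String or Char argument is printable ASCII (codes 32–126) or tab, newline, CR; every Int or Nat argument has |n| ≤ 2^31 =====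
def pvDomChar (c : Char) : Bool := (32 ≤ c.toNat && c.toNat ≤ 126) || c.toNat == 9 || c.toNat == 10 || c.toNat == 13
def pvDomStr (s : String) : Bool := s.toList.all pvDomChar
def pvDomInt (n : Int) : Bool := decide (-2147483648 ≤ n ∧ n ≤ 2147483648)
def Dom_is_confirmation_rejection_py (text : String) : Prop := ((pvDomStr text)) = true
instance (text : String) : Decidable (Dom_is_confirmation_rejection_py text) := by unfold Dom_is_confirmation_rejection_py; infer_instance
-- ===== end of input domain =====

-- B replaces A's per-phrase equals/startswith loop by a single left-to-right scan of the
-- text with a growing prefix accumulator, testing the prefix against a phrase set at each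
-- space and at the end (objective: alternative decomposition; same observable behaviour).

-- ===== PORT A =====
-- A's tuple of rejection phrases (as lists of chars; string facts are proved on the list side)
def pvRejectedPhrases : List (List Char) :=
  ["no".toList, "no thanks".toList, "no thank you".toList, "don't".toList,
   "do not".toList, "cancel that".toList, "never mind".toList, "not now".toList,
   "stop".toList]

def is_confirmation_rejection_py (text : String) : Bool :=
  let t := text.toList
  if t = [] then false
  else pvRejectedPhrases.any (fun p => t == p || PySem.Chars.startswith t (p ++ [' ']))

-- ===== PORT B =====
-- B's set of rejection phrases
def pvPhraseSet : PySem.Set (List Char) :=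
  PySem.Set.ofList
    ["no".toList, "no thanks".toList, "no thank you".toList, "don't".toList,
     "do not".toList, "cancel that".toList, "never mind".toList, "not now".toList,
     "stop".toList]

-- B's loop: scan the remaining characters, carrying the prefix read so far;
-- an early `return True` becomes the `true` branch of the recursion.
def pvScan (pre : List Char) (rest : List Char) : Bool :=
  match rest with
  | [] => PySem.Set.contains pvPhraseSet pre
  | c :: rs =>
    if c = ' ' && PySem.Set.contains pvPhraseSet pre then true
    else pvScan (pre ++ [c]) rs

def is_confirmation_rejection_py_alt (text : String) : Bool :=
  pvScan [] text.toList

-- ===== PRECONDITION & SPEC =====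
def Spec_is_confirmation_rejection_py (text : String) (out : Bool) : Prop := out = is_confirmation_rejection_py_alt text
instance (text : String) (out : Bool) : Decidable (Spec_is_confirmation_rejection_py text out) := by unfold Spec_is_confirmation_rejection_py; infer_instance

-- ===== CLAIM (what is proved, stated in full; the proofs are below) =====
def Claim_equal_is_confirmation_rejection_py : Prop := ∀ (text : String), Dom_is_confirmation_rejection_py text → Spec_is_confirmation_rejection_py text (is_confirmation_rejection_py text)

-- ===== LEMMAS AND PROOFS =====

-- the set literal holds exactly A's phrase list (the literal is duplicate-free)
lemma pvPhraseSet_eq : pvPhraseSet = pvRejectedPhrases := by decide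

lemma contains_iff (t : List Char) :
    PySem.Set.contains pvPhraseSet t = true ↔ t ∈ pvRejectedPhrases := by
  rw [pvPhraseSet_eq]
  simp [PySem.Set.contains]

-- "text starts with phrase + ' '" ↔ "some space-bounded prefix of text is the phrase"
lemma startswith_phrase_space_iff (t p : List Char) :
    (p ++ [' ']) <+: t ↔ ∃ k : Nat, ∃ h : k < t.length, t[k] = ' ' ∧ t.take k = p := by
  constructor
  · rintro ⟨s, hs⟩
    refine ⟨p.length, ?_, ?_, ?_⟩
    · subst hs; simp
    · subst hs; simp
    · subst hs
      rw [List.append_assoc, List.take_left]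
  · rintro ⟨k, hk, hsp, htake⟩
    refine ⟨t.drop (k+1), ?_⟩
    rw [← htake, ← hsp]
    rw [← List.take_succ_eq_append_getElem hk]
    exact List.take_append_drop _ _

-- invariant of B's scan: it fires exactly on a phrase at a space boundary or at the end
lemma pvScan_iff (rest : List Char) : ∀ pre : List Char,
    pvScan pre rest = true ↔
      (pre ++ rest ∈ pvRejectedPhrases ∨
       ∃ k : Nat, ∃ h : k < rest.length, rest[k] = ' ' ∧ pre ++ rest.take k ∈ pvRejectedPhrases) := by
  induction rest with
  | nil =>
    intro pre
    rw [pvScan, contains_iff]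
    simp
  | cons c rs ih =>
    intro pre
    rw [pvScan]
    by_cases hc : c = ' ' && PySem.Set.contains pvPhraseSet pre
    · simp only [hc, if_true, true_iff]
      rw [Bool.and_eq_true, decide_eq_true_iff, contains_iff] at hc
      exact Or.inr ⟨0, by simp, by simpa using hc.1, by simpa using hc.2⟩
    · simp only [hc]
      rw [if_neg (by simp), ih]
      constructor
      · rintro (h | ⟨k, hk, hsp, hmem⟩)
        · exact Or.inl (by simpa using h)
        · exact Or.inr ⟨k + 1, by simpa using hk, by simpa using hsp, by simpa using hmem⟩
      · rintro (h | ⟨k, hk, hsp, hmem⟩)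
        · exact Or.inl (by simpa using h)
        · match k with
          | 0 =>
            exfalso
            apply hc
            rw [Bool.and_eq_true, decide_eq_true_iff, contains_iff]
            exact ⟨by simpa using hsp, by simpa using hmem⟩
          | k + 1 =>
            exact Or.inr ⟨k, by simpa using hk, by simpa using hsp, by simpa using hmem⟩

-- ===== VERDICT (by name: the statement is the Claim_ definition above) =====
theorem is_confirmation_rejection_py_spec : Claim_equal_is_confirmation_rejection_py := by
  intro text _
  unfold Spec_is_confirmation_rejection_py is_confirmation_rejection_py is_confirmation_rejection_py_alt
  rw [Bool.eq_iff_iff, pvScan_iff]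
  simp only [List.nil_append]
  by_cases h : text.toList = []
  · simp [h, show [] ∉ pvRejectedPhrases by decide]
  · simp only [h, if_false, List.any_eq_true, Bool.or_eq_true, beq_iff_eq,
      PySem.Chars.startswith_iff]
    constructor
    · rintro ⟨p, hp, heq | hpre⟩
      · exact Or.inl (heq ▸ hp)
      · rcases (startswith_phrase_space_iff _ p).mp hpre with ⟨k, hk, hsp, htake⟩
        exact Or.inr ⟨k, hk, hsp, htake ▸ hp⟩
    · rintro (hmem | ⟨k, hk, hsp, hmem⟩)
      · exact ⟨_, hmem, Or.inl rfl⟩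
      · exact ⟨_, hmem, Or.inr ((startswith_phrase_space_iff _ _).mpr ⟨k, hk, hsp, rfl⟩)⟩
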